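-- pv_equiv track=rewrite | github.com/QI1002/exampool | Cracking_the_Coding_Interview/6-2.py | checkdomino
-- ===== SOURCE A (Python) =====
-- def isEven(x,y):
--     return (abs(x-y) & 1) == 0
--
-- def checkdomino(size, exclude):
--     countOdd = 0
--     countEven = 0
--     for i in range(size):
--         for j in range(size):
--         	  if ((i,j) in exclude):
--         	      continue
--         	  if (isEven(i,j)):
--         	      countOdd += 1
--         	  else:
--         	      countEven += 1
--
--     return countEven == countOdd
-- ===== SOURCE B (Python) =====
-- def checkdomino(size, exclude):
--     n = size if size > 0 else 0
--     cells = {c for c in exclude if 0 <= c[0] < n and 0 <= c[1] < n}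
--     bal = sum(1 if (x + y) % 2 == 0 else -1 for (x, y) in cells)
--     return bal == n * n % 2
-- ===== Notes on version B (the rewrite author's own statement) =====
-- stated objective: faster
-- what changed: Replaces A's O(size^2) double loop over every grid cell with a closed-form parity balance (size*size % 2) compared against a single pass over the deduplicated in-range excluded cells.
import Mathlib
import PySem

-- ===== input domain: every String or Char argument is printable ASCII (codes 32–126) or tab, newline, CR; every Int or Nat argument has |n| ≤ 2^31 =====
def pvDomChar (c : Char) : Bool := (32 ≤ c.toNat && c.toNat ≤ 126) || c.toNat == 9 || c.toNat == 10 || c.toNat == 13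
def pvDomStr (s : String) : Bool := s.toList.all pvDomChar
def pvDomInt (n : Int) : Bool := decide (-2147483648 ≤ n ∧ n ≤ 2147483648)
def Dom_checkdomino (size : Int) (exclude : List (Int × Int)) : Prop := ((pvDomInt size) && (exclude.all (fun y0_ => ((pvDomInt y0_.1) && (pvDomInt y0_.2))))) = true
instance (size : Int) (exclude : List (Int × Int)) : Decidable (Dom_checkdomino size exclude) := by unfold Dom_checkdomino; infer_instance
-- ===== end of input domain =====

-- B replaces A's double scan of the whole size×size grid by a closed-form parity
-- balance adjusted in a single pass over the deduplicated in-range excluded cells.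

-- ===== PORT A =====
def isEvenA (x y : Int) : Bool := PySem.Int.band |x - y| 1 == 0

def checkdomino (size : Int) (exclude : List (Int × Int)) : Bool :=
  let r := (PySem.List.pyRange 0 size 1).foldl (fun (st : Int × Int) i =>
    (PySem.List.pyRange 0 size 1).foldl (fun (st : Int × Int) j =>
      if (i, j) ∈ exclude then st
      else if isEvenA i j then (st.1 + 1, st.2) else (st.1, st.2 + 1)) st) (0, 0)
  r.2 == r.1

-- ===== PORT B =====
def checkdomino_alt (size : Int) (exclude : List (Int × Int)) : Bool :=
  let n : Int := if size > 0 then size else 0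
  let cells := PySem.Set.ofList
    (exclude.filter (fun c => decide (0 ≤ c.1 ∧ c.1 < n ∧ 0 ≤ c.2 ∧ c.2 < n)))
  let bal : Int := (cells.map (fun c =>
    if PySem.Int.mod (c.1 + c.2) 2 = 0 then (1 : Int) else -1)).sum
  bal == PySem.Int.mod (n * n) 2

-- ===== PRECONDITION & SPEC =====
def Spec_checkdomino (size : Int) (exclude : List (Int × Int)) (out : Bool) : Prop := out = checkdomino_alt size exclude
instance (size : Int) (exclude : List (Int × Int)) (out : Bool) : Decidable (Spec_checkdomino size exclude out) := by unfold Spec_checkdomino; infer_instance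

-- ===== CLAIM (what is proved, stated in full; the proofs are below) =====
def Claim_equal_checkdomino : Prop := ∀ (size : Int) (exclude : List (Int × Int)), Dom_checkdomino size exclude → Spec_checkdomino size exclude (checkdomino size exclude)

-- ===== LEMMAS AND PROOFS =====

-- parity weight of a cell: +1 on even |i-j| (A's "countOdd" side), -1 otherwise
def wgt (c : Int × Int) : Int := if (c.1 + c.2) % 2 = 0 then 1 else -1

-- per-cell contributions of A's inner loop
def oInd (ex : List (Int × Int)) (i j : Int) : Int :=
  if (i, j) ∈ ex then 0 else if isEvenA i j then 1 else 0
def eInd (ex : List (Int × Int)) (i j : Int) : Int :=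
  if (i, j) ∈ ex then 0 else if isEvenA i j then 0 else 1
def maskW (ex : List (Int × Int)) (i j : Int) : Int :=
  if (i, j) ∈ ex then 0 else wgt (i, j)

def gridSum (n : Int) (f : Int → Int → Int) : Int :=
  ((PySem.List.pyRange 0 n 1).map (fun i =>
    ((PySem.List.pyRange 0 n 1).map (fun j => f i j)).sum)).sum

theorem isEvenA_eq (x y : Int) : isEvenA x y = decide ((x + y) % 2 = 0) := by
  have h2 : PySem.Int.mod |x - y| 2 = |x - y| % 2 := PySem.Int.mod_eq_emod_of_pos (by omega)
  rw [isEvenA, PySem.Int.band_one, h2]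
  rcases abs_cases (x - y) with ⟨he, _⟩ | ⟨he, _⟩ <;> rw [he] <;>
    rw [Bool.eq_iff_iff] <;> simp only [beq_iff_eq, decide_eq_true_eq] <;> omega

theorem inner_fold (ex : List (Int × Int)) (i : Int) (L : List Int) (st : Int × Int) :
    L.foldl (fun (st : Int × Int) j =>
      if (i, j) ∈ ex then st
      else if isEvenA i j then (st.1 + 1, st.2) else (st.1, st.2 + 1)) st
    = (st.1 + (L.map (oInd ex i)).sum, st.2 + (L.map (eInd ex i)).sum) := by
  induction L generalizing st with
  | nil => simp
  | cons j L ih =>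
    rw [List.foldl_cons, ih]
    simp only [List.map_cons, List.sum_cons, oInd, eInd]
    split_ifs <;> refine Prod.ext ?_ ?_ <;> dsimp <;> ring

theorem outer_fold (ex : List (Int × Int)) (I L : List Int) (st : Int × Int) :
    I.foldl (fun (st : Int × Int) i =>
      L.foldl (fun (st : Int × Int) j =>
        if (i, j) ∈ ex then st
        else if isEvenA i j then (st.1 + 1, st.2) else (st.1, st.2 + 1)) st) st
    = (st.1 + (I.map (fun i => (L.map (oInd ex i)).sum)).sum,
       st.2 + (I.map (fun i => (L.map (eInd ex i)).sum)).sum) := by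
  induction I generalizing st with
  | nil => simp
  | cons i I ih =>
    rw [List.foldl_cons, inner_fold, ih]
    simp only [List.map_cons, List.sum_cons]
    refine Prod.ext ?_ ?_ <;> dsimp <;> ring

theorem sum_single {α : Type} [DecidableEq α] (L : List α) (hnd : L.Nodup) (a : α) (f : α → Int) :
    (L.map (fun x => if x = a then f x else 0)).sum = if a ∈ L then f a else 0 := by
  induction L with
  | nil => simp
  | cons x L ih =>
    rcases List.nodup_cons.mp hnd with ⟨hx, hnd'⟩
    simp only [List.map_cons, List.sum_cons, ih hnd', List.mem_cons]
    by_cases hxa : x = a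
    · subst hxa; simp [hx]
    · simp [hxa, Ne.symm hxa]

theorem gridSum_split (n : Int) (f g : Int → Int → Int) :
    gridSum n (fun i j => f i j + g i j) = gridSum n f + gridSum n g := by
  unfold gridSum
  rw [← PySem.List.sum_map_add_int]
  exact congrArg List.sum (List.map_congr_left (fun i _ => by
    rw [← PySem.List.sum_map_add_int]))

theorem gridSum_congr (n : Int) (f g : Int → Int → Int)
    (h : ∀ i j, 0 ≤ i → i < n → 0 ≤ j → j < n → f i j = g i j) :
    gridSum n f = gridSum n g := by
  unfold gridSum
  refine congrArg List.sum (List.map_congr_left (fun i hi => ?_))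
  rcases PySem.List.mem_pyRange_one.mp hi with ⟨hi0, hi1⟩
  refine congrArg List.sum (List.map_congr_left (fun j hj => ?_))
  rcases PySem.List.mem_pyRange_one.mp hj with ⟨hj0, hj1⟩
  exact h i j hi0 hi1 hj0 hj1

theorem rowsum (i : Int) (m : Nat) :
    ((PySem.List.pyRange 0 (m : Int) 1).map (fun j => wgt (i, j))).sum
    = if (m : Int) % 2 = 0 then 0 else (if i % 2 = 0 then 1 else -1) := by
  induction m with
  | zero => simp [PySem.List.pyRange_one_eq_nil (le_refl (0 : Int))]
  | succ m ih =>
    have hc : ((m + 1 : Nat) : Int) = (m : Int) + 1 := by push_cast; ring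
    rw [hc, PySem.List.pyRange_one_succ_right (by positivity), List.map_append, List.sum_append, ih]
    simp only [List.map_cons, List.map_nil, List.sum_cons, List.sum_nil, wgt]
    rcases Int.emod_two_eq (m : Int) with hm | hm <;>
      rcases Int.emod_two_eq i with hi | hi <;> split_ifs <;> omega

theorem gridsum_wgt (m : Nat) :
    gridSum (m : Int) (fun i j => wgt (i, j)) = ((m : Int) * m) % 2 := by
  have key : ∀ k : Nat,
      ((PySem.List.pyRange 0 (k : Int) 1).map (fun i =>
        ((PySem.List.pyRange 0 (m : Int) 1).map (fun j => wgt (i, j))).sum)).sum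
      = if (m : Int) % 2 = 0 then 0 else ((k : Int) % 2) := by
    intro k
    induction k with
    | zero => simp [PySem.List.pyRange_one_eq_nil (le_refl (0 : Int))]
    | succ k ih =>
      have hc : ((k + 1 : Nat) : Int) = (k : Int) + 1 := by push_cast; ring
      rw [hc, PySem.List.pyRange_one_succ_right (by positivity), List.map_append,
        List.sum_append, ih]
      simp only [List.map_cons, List.map_nil, List.sum_cons, List.sum_nil, rowsum]
      rcases Int.emod_two_eq (m : Int) with hm | hm <;>
        rcases Int.emod_two_eq (k : Int) with hk | hk <;> split_ifs <;> omega
  show ((PySem.List.pyRange 0 (m : Int) 1).map (fun i =>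
        ((PySem.List.pyRange 0 (m : Int) 1).map (fun j => wgt (i, j))).sum)).sum = _
  rw [key m, Int.mul_emod]
  rcases Int.emod_two_eq (m : Int) with hm | hm <;> rw [hm] <;> norm_num

theorem pair_sum (n : Int) (p : Int × Int)
    (hp : 0 ≤ p.1 ∧ p.1 < n ∧ 0 ≤ p.2 ∧ p.2 < n) :
    gridSum n (fun i j => if (i, j) = p then wgt (i, j) else 0) = wgt p := by
  have h1 : p.1 ∈ PySem.List.pyRange 0 n 1 :=
    PySem.List.mem_pyRange_one.mpr ⟨hp.1, hp.2.1⟩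
  have h2 : p.2 ∈ PySem.List.pyRange 0 n 1 :=
    PySem.List.mem_pyRange_one.mpr ⟨hp.2.2.1, hp.2.2.2⟩
  have inner : ∀ i : Int,
      ((PySem.List.pyRange 0 n 1).map (fun j => if (i, j) = p then wgt (i, j) else 0)).sum
      = if i = p.1 then wgt p else 0 := by
    intro i
    by_cases hip : i = p.1
    · subst hip
      have he : ((PySem.List.pyRange 0 n 1).map (fun j => if (p.1, j) = p then wgt (p.1, j) else 0))
          = ((PySem.List.pyRange 0 n 1).map (fun j => if j = p.2 then wgt (p.1, j) else 0)) := by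
        refine List.map_congr_left (fun j _ => ?_)
        rcases p with ⟨a, b⟩
        simp [Prod.ext_iff]
      rw [he, sum_single _ (PySem.List.nodup_pyRange_one 0 n) p.2 (fun j => wgt (p.1, j)),
        if_pos h2, if_pos rfl]
    · have he : ((PySem.List.pyRange 0 n 1).map (fun j => if (i, j) = p then wgt (i, j) else 0))
          = ((PySem.List.pyRange 0 n 1).map (fun _ => (0 : Int))) := by
        refine List.map_congr_left (fun j _ => ?_)
        rcases p with ⟨a, b⟩
        simp_all [Prod.ext_iff]
      rw [he, if_neg hip]
      simp
  show ((PySem.List.pyRange 0 n 1).map (fun i =>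
      ((PySem.List.pyRange 0 n 1).map (fun j => if (i, j) = p then wgt (i, j) else 0)).sum)).sum = _
  calc ((PySem.List.pyRange 0 n 1).map (fun i =>
          ((PySem.List.pyRange 0 n 1).map (fun j => if (i, j) = p then wgt (i, j) else 0)).sum)).sum
      = ((PySem.List.pyRange 0 n 1).map (fun i => if i = p.1 then wgt p else 0)).sum :=
        congrArg List.sum (List.map_congr_left (fun i _ => inner i))
    _ = wgt p := by
        rw [sum_single _ (PySem.List.nodup_pyRange_one 0 n) p.1 (fun _ => wgt p), if_pos h1]

theorem excl_sum (n : Int) (C : List (Int × Int)) (hnd : C.Nodup)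
    (hrange : ∀ c ∈ C, 0 ≤ c.1 ∧ c.1 < n ∧ 0 ≤ c.2 ∧ c.2 < n) :
    gridSum n (fun i j => if (i, j) ∈ C then wgt (i, j) else 0) = (C.map wgt).sum := by
  induction C with
  | nil => simp [gridSum]
  | cons p C ih =>
    rcases List.nodup_cons.mp hnd with ⟨hp, hnd'⟩
    have step : (fun i j => if (i, j) ∈ p :: C then wgt (i, j) else 0)
        = (fun i j => (if (i, j) = p then wgt (i, j) else 0)
            + (if (i, j) ∈ C then wgt (i, j) else 0)) := by
      funext i j
      by_cases h1 : (i, j) = p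
      · subst h1; simp [hp]
      · by_cases h2 : (i, j) ∈ C <;> simp [h1, h2]
    rw [step, gridSum_split, pair_sum n p (hrange p (List.mem_cons_self ..)),
      ih hnd' (fun c hc => hrange c (List.mem_cons_of_mem _ hc))]
    simp

-- ===== VERDICT (by name: the statement is the Claim_ definition above) =====
theorem checkdomino_spec : Claim_equal_checkdomino := by
  intro size exclude _
  show checkdomino size exclude = checkdomino_alt size exclude
  by_cases hs : size > 0
  · -- positive size
    set n := size with hn
    have hm : ((size.toNat : Int)) = size := Int.toNat_of_nonneg (le_of_lt hs)
    -- A's value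
    rw [checkdomino, outer_fold]
    -- B's value
    rw [checkdomino_alt]
    simp only [if_pos hs]
    set C := PySem.Set.ofList
      (exclude.filter (fun c => decide (0 ≤ c.1 ∧ c.1 < size ∧ 0 ≤ c.2 ∧ c.2 < size))) with hC
    have hCnd : C.Nodup := PySem.Set.nodup_ofList _
    have hCmem : ∀ c : Int × Int, c ∈ C ↔ (c ∈ exclude ∧ (0 ≤ c.1 ∧ c.1 < size ∧ 0 ≤ c.2 ∧ c.2 < size)) := by
      intro c
      rw [hC, PySem.Set.mem_ofList, List.mem_filter]
      simp
    have hCrange : ∀ c ∈ C, 0 ≤ c.1 ∧ c.1 < size ∧ 0 ≤ c.2 ∧ c.2 < size :=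
      fun c hc => ((hCmem c).mp hc).2
    -- bal uses emod
    have hbal : (C.map (fun c => if PySem.Int.mod (c.1 + c.2) 2 = 0 then (1 : Int) else -1))
        = C.map wgt := by
      refine List.map_congr_left (fun c _ => ?_)
      rw [wgt, PySem.Int.mod_eq_emod_of_pos (by omega : (0:Int) < 2)]
    rw [hbal]
    -- sum identities
    have hSO : gridSum size (oInd exclude)
        = gridSum size (eInd exclude) + gridSum size (maskW exclude) := by
      have : (fun i j => oInd exclude i j)
          = (fun i j => eInd exclude i j + maskW exclude i j) := by
        funext i j
        simp only [oInd, eInd, maskW, wgt, isEvenA_eq]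
        by_cases h1 : (i, j) ∈ exclude
        · simp [h1]
        · by_cases h2 : (i + j) % 2 = 0 <;> simp [h1, h2]
      calc gridSum size (oInd exclude) = gridSum size (fun i j => eInd exclude i j + maskW exclude i j) := by rw [← this]
        _ = _ := gridSum_split ..
    have hT : gridSum size (maskW exclude)
        + gridSum size (fun i j => if (i, j) ∈ C then wgt (i, j) else 0)
        = gridSum size (fun i j => wgt (i, j)) := by
      rw [← gridSum_split]
      refine gridSum_congr size _ _ (fun i j hi0 hi1 hj0 hj1 => ?_)
      have hiff : ((i, j) ∈ exclude) ↔ ((i, j) ∈ C) := by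
        rw [hCmem (i, j)]
        constructor
        · intro h; exact ⟨h, hi0, hi1, hj0, hj1⟩
        · exact fun h => h.1
      simp only [maskW]
      by_cases h : (i, j) ∈ exclude
      · simp [h, hiff.mp h]
      · have hc : (i, j) ∉ C := fun hc => h (hiff.mpr hc)
        simp [h, hc]
    have hG : gridSum size (fun i j => wgt (i, j)) = (size * size) % 2 := by
      rw [← hm]; exact gridsum_wgt size.toNat
    have hX : gridSum size (fun i j => if (i, j) ∈ C then wgt (i, j) else 0) = (C.map wgt).sum :=
      excl_sum size C hCnd hCrange
    have hmod2 : PySem.Int.mod (size * size) 2 = (size * size) % 2 :=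
      PySem.Int.mod_eq_emod_of_pos (by omega)
    rw [hmod2]
    rw [Bool.eq_iff_iff]
    simp only [beq_iff_eq]
    -- the two fold sums are exactly the gridSums
    change (0 : Int) + gridSum size (eInd exclude) = 0 + gridSum size (oInd exclude)
        ↔ (C.map wgt).sum = (size * size) % 2
    omega
  · -- size ≤ 0 : both sides are true
    have hnil : PySem.List.pyRange 0 size 1 = [] :=
      PySem.List.pyRange_one_eq_nil (by omega)
    have hfilter : exclude.filter
        (fun c => decide (0 ≤ c.1 ∧ c.1 < (0:Int) ∧ 0 ≤ c.2 ∧ c.2 < (0:Int))) = [] := by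
      refine List.filter_eq_nil_iff.mpr (fun c _ => ?_)
      simp only [decide_eq_true_eq, not_and]
      omega
    rw [checkdomino, checkdomino_alt, hnil]
    simp only [if_neg hs]
    rw [hfilter]
    simp [PySem.Set.ofList, PySem.Int.mod]
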